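-- pv_equiv track=rewrite | github.com/JR5x/AoC2023 | Advent3-2.py | create_smaller_array
-- ===== SOURCE A (Python) =====
-- def create_smaller_array(original_array, i, j):
--     start_row = max(0, i - 1)
--     end_row = min(len(original_array), i + 2)
--     start_col = max(0, j - 3)
--     end_col = min(len(original_array[0]), j + 4)
--     smaller_array = []
--     for i in range(start_row, end_row):
--         row = original_array[i][start_col:end_col]
--         if len(row) < 7:
--             row.extend([' '] * (7 - len(row)))
--         smaller_array.append(row)
--     while len(smaller_array) < 3:
--         smaller_array.append([' '] * 7)
--     smaller_array = smaller_array[:3]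
--     return smaller_array
-- ===== SOURCE B (Python) =====
-- def create_smaller_array(original_array, i, j):
--     start_row = max(0, i - 1)
--     end_row = min(len(original_array), i + 2)
--     start_col = max(0, j - 3)
--     end_col = min(len(original_array[0]), j + 4)
--     result = []
--     for r in range(3):
--         rr = start_row + r
--         if rr < end_row:
--             row = original_array[rr]
--             result.append([row[start_col + c] if start_col + c < min(end_col, len(row)) else ' '
--                            for c in range(7)])
--         else:
--             result.append([' '] * 7)
--     return result
-- ===== Notes on version B (the rewrite author's own statement) =====
-- stated objective: alternative
-- what changed: B builds the 3x7 window by a fixed nested loop fetching each cell directly by coordinates (blank outside the window), instead of A's slice-each-row, measure-and-pad, then while-pad-and-truncate-rows pipeline.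
-- intended difference: For j <= -5 when a selected window row is longer than -(j+4) and the wrapped slice is visible (longer than 7 cells or containing a non-space cell), A's negative slice stop wraps around and A returns leading cells of those rows; B returns the all-blank window, intended since every window column index is negative. — e.g. on create_smaller_array([["a","b","c","d","e","f"]], 0, -5): A returns [["a","b","c","d","e"," "," "], [" "," "," "," "," "," "," "], [" "," "," "," "," "," "," "]], B returns [[" "," "," "," "," "," "," "], [" "," "," "," "," "," "," "], [" "," "," "," "," "," "," "]]
-- outside the precondition, e.g. on create_smaller_array([], 0, 0): A raises IndexError, B raises IndexError
import Mathlib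
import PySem

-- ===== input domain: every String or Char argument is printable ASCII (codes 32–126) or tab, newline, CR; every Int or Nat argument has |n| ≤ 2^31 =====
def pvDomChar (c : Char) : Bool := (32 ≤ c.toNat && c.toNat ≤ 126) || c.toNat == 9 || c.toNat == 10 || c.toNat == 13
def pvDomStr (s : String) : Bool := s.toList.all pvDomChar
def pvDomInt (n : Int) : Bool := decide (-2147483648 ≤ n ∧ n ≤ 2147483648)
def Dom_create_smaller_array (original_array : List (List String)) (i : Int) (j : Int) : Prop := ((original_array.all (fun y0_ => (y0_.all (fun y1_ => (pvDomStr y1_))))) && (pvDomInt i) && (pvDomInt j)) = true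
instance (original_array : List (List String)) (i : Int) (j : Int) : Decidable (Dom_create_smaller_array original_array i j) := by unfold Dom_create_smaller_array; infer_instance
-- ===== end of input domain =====

-- B replaces A's slice-then-pad-then-pad/truncate strategy with a fixed 3×7 nested
-- comprehension fetching each cell directly (or ' ' outside the window): objective 'alternative'.
-- On j ≤ -5 with a long enough window row A's negative slice stop wraps around (Python
-- row[0:negative]); B returns blanks there, the intended empty window (see D_ below).

-- ===== PORT A =====
-- while len(smaller_array) < 3: append a blank row
-- structural fuel recursion: each pass appends one row, so 3 passes always reach length ≥ 3
def padTo3 : Nat → List (List String) → List (List String)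
  | 0, sm => sm
  | n + 1, sm => if sm.length < 3 then padTo3 n (sm ++ [List.replicate 7 " "]) else sm

def create_smaller_array (original_array : List (List String)) (i : Int) (j : Int) : List (List String) :=
  let start_row := max 0 (i - 1)
  let end_row := min (original_array.length : Int) (i + 2)
  let start_col := max 0 (j - 3)
  -- original_array[0] raises IndexError on []; Pre_ excludes that input (we read [] there)
  let row0 := (PySem.List.pyGet? original_array 0).getD []
  let end_col := min (row0.length : Int) (j + 4)
  let sm := (PySem.List.pyRange start_row end_row 1).foldl (fun acc k =>
      -- original_array[k]: k is always in range when the loop runs (exact)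
      let row := PySem.List.slice ((PySem.List.pyGet? original_array k).getD []) (some start_col) (some end_col)
      let row := if row.length < 7 then row ++ List.replicate (7 - row.length) " " else row
      acc ++ [row]) []
  PySem.List.slice (padTo3 3 sm) none (some 3)

-- ===== PORT B =====
def create_smaller_array_alt (original_array : List (List String)) (i : Int) (j : Int) : List (List String) :=
  match original_array with
  | [] => []   -- Python B raises IndexError here; outside Pre_
  | row0 :: _ =>
    let start_row := max 0 (i - 1)
    let end_row := min (original_array.length : Int) (i + 2)
    let start_col := max 0 (j - 3)
    let end_col := min ((row0.length : Int)) (j + 4)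
    (List.range 3).map (fun (r : Nat) =>
      let rr := start_row + (r : Int)
      if rr < end_row then
        let row := (PySem.List.pyGet? original_array rr).getD []
        (List.range 7).map (fun (c : Nat) =>
          if start_col + (c : Int) < min end_col (row.length : Int) then
            (PySem.List.pyGet? row (start_col + (c : Int))).getD " "
          else " ")
      else List.replicate 7 " ")

-- ===== PRECONDITION & SPEC =====
-- Pre_ excludes only the empty grid, on which both Pythons raise IndexError at original_array[0].
def Pre_create_smaller_array (original_array : List (List String)) (i : Int) (j : Int) : Prop :=
  original_array ≠ []
instance (original_array : List (List String)) (i : Int) (j : Int) : Decidable (Pre_create_smaller_array original_array i j) := by unfold Pre_create_smaller_array; infer_instance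
def pvWitness_create_smaller_array : List (List String) × Int × Int := ([["x", "y"]], 0, 0)

-- On inputs with j ≤ -5 where some selected window row is longer than -(j+4) (so A's slice
-- row[0:j+4] wraps the negative stop around) and that wrapped slice is visible (longer than 7,
-- or containing a cell other than ' '), A returns leading cells of that row, while B returns the
-- all-blank window, the intended value since every window column index is negative.
def D_create_smaller_array (original_array : List (List String)) (i : Int) (j : Int) : Prop :=
  j + 4 < 0 ∧
    ∃ row ∈ (original_array.take (i + 2).toNat).drop (i - 1).toNat,
      7 < (row.length : Int) + (j + 4) ∨
        ∃ c ∈ List.range ((row.length : Int) + (j + 4)).toNat, row.getD c " " ≠ " "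
instance (original_array : List (List String)) (i : Int) (j : Int) : Decidable (D_create_smaller_array original_array i j) := by unfold D_create_smaller_array; infer_instance

def Spec_create_smaller_array (original_array : List (List String)) (i : Int) (j : Int) (out : List (List String)) : Prop := ¬ D_create_smaller_array original_array i j → out = create_smaller_array_alt original_array i j
instance (original_array : List (List String)) (i : Int) (j : Int) (out : List (List String)) : Decidable (Spec_create_smaller_array original_array i j out) := by unfold Spec_create_smaller_array; infer_instance

def pvDiffWitness_create_smaller_array : List (List String) × Int × Int := ([["a","b","c","d","e","f"]], 0, -5)
def pvDiffWitnessOut_create_smaller_array : (List (List String)) × (List (List String)) :=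
  ([["a","b","c","d","e"," "," "], [" "," "," "," "," "," "," "], [" "," "," "," "," "," "," "]],
   [[" "," "," "," "," "," "," "], [" "," "," "," "," "," "," "], [" "," "," "," "," "," "," "]])

-- ===== CLAIM (what is proved, stated in full; the proofs are below) =====
def Claim_unchanged_create_smaller_array : Prop := ∀ (original_array : List (List String)) (i : Int) (j : Int), Dom_create_smaller_array original_array i j → Pre_create_smaller_array original_array i j → Spec_create_smaller_array original_array i j (create_smaller_array original_array i j)
def Claim_changed_create_smaller_array : Prop := Dom_create_smaller_array (pvDiffWitness_create_smaller_array.1) (pvDiffWitness_create_smaller_array.2.1) (pvDiffWitness_create_smaller_array.2.2) ∧ Pre_create_smaller_array (pvDiffWitness_create_smaller_array.1) (pvDiffWitness_create_smaller_array.2.1) (pvDiffWitness_create_smaller_array.2.2) ∧ D_create_smaller_array (pvDiffWitness_create_smaller_array.1) (pvDiffWitness_create_smaller_array.2.1) (pvDiffWitness_create_smaller_array.2.2) ∧ create_smaller_array (pvDiffWitness_create_smaller_array.1) (pvDiffWitness_create_smaller_array.2.1) (pvDiffWitness_create_smaller_array.2.2) = pvDiffWitnessOut_create_smaller_array.1 ∧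 create_smaller_array_alt (pvDiffWitness_create_smaller_array.1) (pvDiffWitness_create_smaller_array.2.1) (pvDiffWitness_create_smaller_array.2.2) = pvDiffWitnessOut_create_smaller_array.2 ∧ pvDiffWitnessOut_create_smaller_array.1 ≠ pvDiffWitnessOut_create_smaller_array.2
def Claim_exact_create_smaller_array : Prop := ∀ (original_array : List (List String)) (i : Int) (j : Int), Dom_create_smaller_array original_array i j → Pre_create_smaller_array original_array i j → D_create_smaller_array original_array i j → create_smaller_array original_array i j ≠ create_smaller_array_alt original_array i j

-- ===== LEMMAS AND PROOFS =====

-- A's append-accumulator foldl is a map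
lemma foldl_append_map {α β : Type} (g : α → β) (l : List α) (init : List β) :
    l.foldl (fun acc x => acc ++ [g x]) init = init ++ l.map g := by
  induction l generalizing init with
  | nil => simp
  | cons a l ih => simp [List.foldl_cons, ih]

-- padding the ≤3 produced rows to exactly 3 and truncating = a map over range 3
lemma assemble (h : Int → List String) (sr er : Int) (_hsr : 0 ≤ sr) (h3 : er - sr ≤ 3) :
    PySem.List.slice (padTo3 3 ((PySem.List.pyRange sr er 1).map h)) none (some 3)
      = (List.range 3).map (fun (r : Nat) => if sr + (r : Int) < er then h (sr + (r : Int)) else List.replicate 7 " ") := by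
  rw [PySem.List.pyRange_one, PySem.List.slice_to _ (by omega : (0:Int) ≤ (3:Int))]
  have hd : (er - sr).toNat ≤ 3 := by omega
  set n := (er - sr).toNat with hn
  have hr : ∀ r : Nat, (sr + (r : Int) < er) ↔ r < n := by intro r; omega
  interval_cases n <;>
    simp [List.range_succ, padTo3, hr, List.replicate]

lemma padded_eq (l : List String) (x : String) (hl : l.length ≤ 7) :
    (if l.length < 7 then l ++ List.replicate (7 - l.length) x else l)
      = (List.range 7).map (fun (k : Nat) => l.getD k x) := by
  have key : ∀ k, k < 7 → (if l.length < 7 then l ++ List.replicate (7 - l.length) x else l).getD k x = l.getD k x := by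
    intro k hk
    split_ifs with h
    · by_cases h1 : k < l.length
      · simp [List.getD, List.getElem?_append_left h1]
      · have h2 : l[k]? = none := List.getElem?_eq_none (by omega)
        have h3 : (l ++ List.replicate (7 - l.length) x)[k]? = some x := by
          rw [List.getElem?_append_right (by omega)]
          simp [List.getElem?_replicate]; omega
        simp [List.getD, h2, h3]
    · rfl
  have hlen7 : (if l.length < 7 then l ++ List.replicate (7 - l.length) x else l).length = 7 := by
    split_ifs with h
    · simp; omega
    · omega
  apply List.ext_getElem
  · simp [hlen7]
  · intro k hk1 hk2
    have hk7 : k < 7 := by omega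
    have := key k hk7
    simp only [List.getD, List.getElem?_eq_getElem (hlen7 ▸ hk7 : k < _), Option.getD_some] at this
    rw [this]
    simp [List.getElem_range]

-- one window row: A's slice-then-pad equals B's 7 direct coordinate fetches
lemma rowEq (row : List String) (j : Int) (w : Nat)
    (hcase : 0 ≤ j + 4 ∨ ((row.length : Int) + (j + 4) ≤ 7 ∧
      ∀ c ∈ List.range row.length, (c : Int) < (row.length : Int) + (j + 4) → row.getD c " " = " ")) :
    (let s := PySem.List.slice row (some (max 0 (j - 3))) (some (min (w : Int) (j + 4)));
     if s.length < 7 then s ++ List.replicate (7 - s.length) " " else s)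
      = (List.range 7).map (fun (c : Nat) =>
          if max 0 (j - 3) + (c : Int) < min (min (w : Int) (j + 4)) (row.length : Int) then
            (PySem.List.pyGet? row (max 0 (j - 3) + (c : Int))).getD " "
          else " ") := by
  by_cases h4 : 0 ≤ j + 4
  · -- nonnegative stop: the slice is drop/take
    have hsc : (0:Int) ≤ max 0 (j - 3) := by omega
    have hec : (0:Int) ≤ min (w : Int) (j + 4) := by omega
    set sc := max 0 (j - 3) with hscd
    set ec := min (w : Int) (j + 4) with hecd
    rw [show (PySem.List.slice row (some sc) (some ec)) = (row.drop sc.toNat).take (ec.toNat - sc.toNat) from PySem.List.slice_toNat row hsc hec]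
    have hlen : ((row.drop sc.toNat).take (ec.toNat - sc.toNat)).length ≤ 7 := by
      simp [List.length_take, List.length_drop]; omega
    rw [padded_eq _ _ hlen]
    apply List.map_congr_left
    intro k hk
    simp only [List.mem_range] at hk
    by_cases hin : sc + (k : Int) < min ec (row.length : Int)
    · rw [if_pos hin]
      have hklt : k < ((row.drop sc.toNat).take (ec.toNat - sc.toNat)).length := by
        simp [List.length_take, List.length_drop]; omega
      have hidx : sc + (k : Int) = ((sc.toNat + k : Nat) : Int) := by omega
      have hrl : sc.toNat + k < row.length := by omega
      rw [hidx, PySem.List.pyGet?_natCast]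
      simp [List.getD, List.getElem?_eq_getElem hklt, List.getElem?_eq_getElem hrl,
            List.getElem_take, List.getElem_drop]
    · rw [if_neg hin]
      have : ¬ k < ((row.drop sc.toNat).take (ec.toNat - sc.toNat)).length := by
        simp [List.length_take, List.length_drop]; omega
      simp [List.getD, List.getElem?_eq_none (le_of_not_gt this)]
  · -- negative stop: every visible in-window cell is ' ', so the row is 7 blanks on both sides
    obtain ⟨hle7, hsp⟩ := hcase.resolve_left h4
    have hsc : max 0 (j - 3) = 0 := by omega
    have hec : min (w : Int) (j + 4) = j + 4 := by omega
    rw [hsc, hec]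
    obtain ⟨K, hK, hKpos⟩ : ∃ K : Nat, j + 4 = -(K : Int) ∧ 0 < K := ⟨(-(j+4)).toNat, by omega, by omega⟩
    have hslice : PySem.List.slice row (some 0) (some (j + 4)) = row.take (row.length - K) := by
      rw [hK, PySem.List.slice_zero_start, PySem.List.slice_to_neg_natCast row K hKpos]
    rw [hslice]
    have hlen : (row.take (row.length - K)).length ≤ 7 := by
      simp [List.length_take]; omega
    rw [padded_eq _ _ hlen]
    apply List.map_congr_left
    intro c hc
    rw [if_neg (by omega)]
    by_cases hct : c < row.length - K
    · have hcl : c < row.length := by omega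
      have hgd : (row.take (row.length - K)).getD c " " = row.getD c " " := by
        simp [List.getD, List.getElem?_take, hct, List.getElem?_eq_getElem hcl]
      rw [hgd]
      exact hsp c (List.mem_range.mpr hcl) (by omega)
    · have hnone : (row.take (row.length - K))[c]? = none :=
        List.getElem?_eq_none (by simp [List.length_take]; omega)
      simp [List.getD, hnone]

-- membership in D_'s take/drop row window = having an index in A's loop range
lemma window_mem_iff (oa : List (List String)) (i : Int) (row : List String) :
    row ∈ (oa.take (i + 2).toNat).drop (i - 1).toNat ↔
      ∃ m : Nat, m < oa.length ∧ max 0 (i - 1) ≤ (m : Int) ∧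
        (m : Int) < min (oa.length : Int) (i + 2) ∧ oa.getD m [] = row := by
  rw [List.mem_iff_getElem]
  constructor
  · rintro ⟨n, hn, rfl⟩
    simp only [List.length_drop, List.length_take] at hn
    have hml : (i - 1).toNat + n < oa.length := by omega
    refine ⟨(i - 1).toNat + n, hml, by omega, by omega, ?_⟩
    rw [List.getElem_drop, List.getElem_take, List.getD, List.getElem?_eq_getElem hml,
        Option.getD_some]
  · rintro ⟨m, hm, h1, h2, hrow⟩
    have hlen : m - (i - 1).toNat < ((oa.take (i + 2).toNat).drop (i - 1).toNat).length := by
      simp only [List.length_drop, List.length_take]; omega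
    refine ⟨m - (i - 1).toNat, hlen, ?_⟩
    have hidxlt : (i - 1).toNat + (m - (i - 1).toNat) < oa.length := by omega
    rw [List.getElem_drop, List.getElem_take, ← hrow, List.getD,
        show oa[m]? = oa[(i - 1).toNat + (m - (i - 1).toNat)]? from by
          rw [show (i - 1).toNat + (m - (i - 1).toNat) = m from by omega],
        List.getElem?_eq_getElem hidxlt, Option.getD_some]

-- ===== VERDICT (by name: the statement is the Claim_ definition above) =====
theorem create_smaller_array_spec : Claim_unchanged_create_smaller_array := by
  intro oa i j hdom hpre hnd
  obtain ⟨r0, rest, rfl⟩ : ∃ r0 rest, oa = r0 :: rest := by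
    cases oa with
    | nil => exact absurd rfl hpre
    | cons a l => exact ⟨a, l, rfl⟩
  have h0 : (PySem.List.pyGet? (r0 :: rest) (0 : Int)).getD [] = r0 := by
    rw [show (0 : Int) = ((0 : Nat) : Int) from rfl, PySem.List.pyGet?_natCast]; rfl
  simp only [create_smaller_array, create_smaller_array_alt, h0]
  rw [foldl_append_map, List.nil_append]
  rw [assemble _ _ _ (by omega) (by omega)]
  apply List.map_congr_left
  intro r hr
  simp only [List.mem_range] at hr
  by_cases hlt : max 0 (i - 1) + (r : Int) < min (((r0 :: rest).length : Nat) : Int) (i + 2)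
  · rw [if_pos hlt, if_pos hlt]
    set row := (PySem.List.pyGet? (r0 :: rest) (max 0 (i - 1) + (r : Int))).getD [] with hrowd
    have hcase : 0 ≤ j + 4 ∨ ((row.length : Int) + (j + 4) ≤ 7 ∧
        ∀ c ∈ List.range row.length, (c : Int) < (row.length : Int) + (j + 4) → row.getD c " " = " ") := by
      by_cases hj : 0 ≤ j + 4
      · exact Or.inl hj
      · right
        unfold D_create_smaller_array at hnd
        push Not at hnd
        have hforall := hnd (by omega)
        set m : Nat := (max 0 (i - 1) + (r : Int)).toNat with hmd
        have hmlt : m < (r0 :: rest).length := by omega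
        have hcast : ((m : Nat) : Int) = max 0 (i - 1) + (r : Int) := by omega
        have hrow : row = (r0 :: rest).getD m [] := by
          rw [hrowd, ← hcast, PySem.List.pyGet?_natCast, List.getD,
              List.getElem?_eq_getElem hmlt]
        have hmem : row ∈ ((r0 :: rest).take (i + 2).toNat).drop (i - 1).toNat :=
          (window_mem_iff _ i row).mpr ⟨m, hmlt, by omega, by omega, hrow.symm⟩
        obtain ⟨h7, hsp⟩ := hforall row hmem
        exact ⟨by omega, fun c hc hlt =>
          hsp c (List.mem_range.mpr (by omega : c < ((row.length : Int) + (j + 4)).toNat))⟩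
    exact rowEq row j r0.length hcase
  · rw [if_neg hlt, if_neg hlt]

theorem create_smaller_array_changed : Claim_changed_create_smaller_array := by
  unfold Claim_changed_create_smaller_array; decide

theorem create_smaller_array_tight : Claim_exact_create_smaller_array := by
  intro oa i j hdom hpre hD
  obtain ⟨r0, rest, rfl⟩ : ∃ r0 rest, oa = r0 :: rest := by
    cases oa with
    | nil => exact absurd rfl hpre
    | cons a l => exact ⟨a, l, rfl⟩
  obtain ⟨hj4, row₀, hrmem, hrest⟩ := hD
  obtain ⟨m, hmlt, hmsr, hmer, hrow₀⟩ := (window_mem_iff _ i row₀).mp hrmem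
  rw [← hrow₀] at hrest
  intro heq
  have h0 : (PySem.List.pyGet? (r0 :: rest) (0 : Int)).getD [] = r0 := by
    rw [show (0 : Int) = ((0 : Nat) : Int) from rfl, PySem.List.pyGet?_natCast]; rfl
  simp only [create_smaller_array, create_smaller_array_alt, h0] at heq
  rw [foldl_append_map, List.nil_append,
      assemble _ _ _ (by omega) (by omega)] at heq
  set k : Nat := ((m : Int) - max 0 (i - 1)).toNat with hkd
  have hk3 : k < 3 := by omega
  have hmk : max 0 (i - 1) + (k : Int) = (m : Int) := by omega
  have h1 := congrArg (fun l => l[k]?) heq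
  simp only [List.getElem?_map, List.getElem?_range hk3, Option.map_some] at h1
  rw [hmk] at h1
  have hcond : (m : Int) < min (((r0 :: rest).length : Nat) : Int) (i + 2) := by omega
  rw [if_pos hcond, if_pos hcond] at h1
  have h1 := Option.some.inj h1
  -- the window row and its wrapped slice
  set row := (PySem.List.pyGet? (r0 :: rest) (m : Int)).getD [] with hrowd
  have hrow : row = (r0 :: rest).getD m [] := by
    rw [hrowd, PySem.List.pyGet?_natCast, List.getD, List.getElem?_eq_getElem hmlt]
  have hsc : max 0 (j - 3) = 0 := by omega
  have hec : min ((r0.length : Nat) : Int) (j + 4) = j + 4 := by omega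
  obtain ⟨K, hK, hKpos⟩ : ∃ K : Nat, j + 4 = -(K : Int) ∧ 0 < K := ⟨(-(j+4)).toNat, by omega, by omega⟩
  have hslice : PySem.List.slice row (some (max 0 (j - 3))) (some (min ((r0.length : Nat) : Int) (j + 4)))
      = row.take (row.length - K) := by
    rw [hsc, hec, hK, PySem.List.slice_zero_start, PySem.List.slice_to_neg_natCast row K hKpos]
  rw [hslice] at h1
  have hlen : (row.take (row.length - K)).length = row.length - K := by
    simp [List.length_take]
  by_cases h7 : 7 < (row.length : Int) + (j + 4)
  · -- wrapped slice longer than 7: A's row is longer than B's 7 cells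
    have hlen1 := congrArg List.length h1
    rw [apply_ite List.length] at hlen1
    simp only [List.length_append, List.length_replicate, List.length_map, List.length_range, hlen] at hlen1
    split_ifs at hlen1 <;> omega
  · obtain ⟨c, hcmem, hcne⟩ := hrest.resolve_left (by rw [← hrow]; omega)
    rw [← hrow] at hcmem hcne
    have hclt : c < ((row.length : Int) + (j + 4)).toNat := List.mem_range.mp hcmem
    have hcl : c < row.length := by omega
    have hct : c < row.length - K := by omega
    have hc7 : c < 7 := by omega
    rw [padded_eq _ _ (by omega)] at h1
    have h2 := congrArg (fun l => l[c]?) h1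
    simp only [List.getElem?_map, List.getElem?_range hc7, Option.map_some] at h2
    have h2 := Option.some.inj h2
    rw [if_neg (by omega)] at h2
    apply hcne
    rw [show row.getD c " " = (row.take (row.length - K)).getD c " " by
      simp [List.getD, List.getElem?_take, hct, List.getElem?_eq_getElem hcl]]
    exact h2
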